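-- pv_equiv track=rewrite | github.com/Erkezh/studypoint-edu | backend/app/services/practice_service.py | _level_search_order
-- ===== SOURCE A (Python) =====
-- def _level_search_order(difficulty: int) -> list[int]:
--     difficulty = max(1, min(5, difficulty))
--     order = [difficulty]
--     for delta in range(1, 5):
--         hi = difficulty + delta
--         lo = difficulty - delta
--         if hi <= 5:
--             order.append(hi)
--         if lo >= 1:
--             order.append(lo)
--     return order
-- ===== SOURCE B (Python) =====
-- def _level_search_order(difficulty: int) -> list[int]:
--     difficulty = max(1, min(5, difficulty))
--     # order all five levels by distance from difficulty, higher level first on ties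
--     return sorted(range(1, 6), key=lambda x: abs(x - difficulty) * 8 - x)
-- ===== Notes on version B (the rewrite author's own statement) =====
-- stated objective: simpler
-- what changed: Replaces the two-sided delta-expansion loop with bound checks by a single sort of the fixed range of levels under a key that orders by distance from the clamped difficulty with the higher level winning ties.
import Mathlib
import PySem

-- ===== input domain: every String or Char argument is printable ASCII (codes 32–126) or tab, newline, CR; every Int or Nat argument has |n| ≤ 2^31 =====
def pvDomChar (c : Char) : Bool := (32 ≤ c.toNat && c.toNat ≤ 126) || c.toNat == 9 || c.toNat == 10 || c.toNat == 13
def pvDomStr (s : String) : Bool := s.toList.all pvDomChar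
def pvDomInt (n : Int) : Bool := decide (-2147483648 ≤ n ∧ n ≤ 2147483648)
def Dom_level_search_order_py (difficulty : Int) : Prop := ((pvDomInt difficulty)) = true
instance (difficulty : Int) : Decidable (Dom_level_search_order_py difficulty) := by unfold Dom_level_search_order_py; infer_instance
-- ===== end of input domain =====

-- B replaces A's outward delta-expansion loop by one sort of the fixed range 1..5
-- keyed by distance from the clamped difficulty (higher level first on ties): simpler.

-- ===== PORT A =====
def level_search_order_py (difficulty : Int) : List Int :=
  let d := max 1 (min 5 difficulty)
  (PySem.List.pyRange 1 5 1).foldl (fun order delta =>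
    let hi := d + delta
    let lo := d - delta
    let order := if hi ≤ 5 then order ++ [hi] else order
    if 1 ≤ lo then order ++ [lo] else order) [d]

-- ===== PORT B =====
def level_search_order_py_alt (difficulty : Int) : List Int :=
  let d := max 1 (min 5 difficulty)
  PySem.List.sorted (PySem.List.pyRange 1 6 1) (fun x => (x - d).natAbs * 8 - x) false

-- ===== PRECONDITION & SPEC =====
def Spec_level_search_order_py (difficulty : Int) (out : List Int) : Prop := out = level_search_order_py_alt difficulty
instance (difficulty : Int) (out : List Int) : Decidable (Spec_level_search_order_py difficulty out) := by unfold Spec_level_search_order_py; infer_instance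

-- ===== CLAIM (what is proved, stated in full; the proofs are below) =====
def Claim_equal_level_search_order_py : Prop := ∀ (difficulty : Int), Dom_level_search_order_py difficulty → Spec_level_search_order_py difficulty (level_search_order_py difficulty)

-- ===== LEMMAS AND PROOFS =====

-- Both ports depend on the input only through the clamp max 1 (min 5 difficulty),
-- which lies in [1,5]; the claim then reduces to five closed checks.
theorem level_search_order_py_clamped (d : Int) (h : d = max 1 (min 5 d)) :
    level_search_order_py d = level_search_order_py_alt d := by
  unfold level_search_order_py level_search_order_py_alt
  rw [← h]
  have h5 : d ≤ 5 := by omega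
  have h1 : 1 ≤ d := by omega
  interval_cases d <;> decide

-- ===== VERDICT (by name: the statement is the Claim_ definition above) =====
theorem level_search_order_py_spec : Claim_equal_level_search_order_py := by
  unfold Claim_equal_level_search_order_py
  intro d _
  unfold Spec_level_search_order_py
  have key : ∀ c : Int, c = max 1 (min 5 d) →
      level_search_order_py d = level_search_order_py_alt d := by
    intro c hc
    have hcc : max 1 (min 5 c) = max 1 (min 5 d) := by omega
    have hA : level_search_order_py d = level_search_order_py c := by
      unfold level_search_order_py; rw [hcc]
    have hB : level_search_order_py_alt d = level_search_order_py_alt c := by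
      unfold level_search_order_py_alt; rw [hcc]
    rw [hA, hB]
    exact level_search_order_py_clamped c (by omega)
  exact key _ rfl
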